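-- pv_equiv track=rewrite | github.com/nestorwheelock/django-primitives | packages/django-encounters/src/django_encounters/graph.py | validate_definition_graph
-- ===== SOURCE A (Python) =====
-- def validate_definition_graph(
--     states: list[str],
--     transitions: dict[str, list[str]],
--     initial_state: str,
--     terminal_states: list[str]
-- ) -> list[str]:
--     """
--     Validate state machine graph is sane and usable.
--
--     Returns list of error messages (empty = valid).
--
--     Checks:
--     - initial_state exists in states
--     - all terminal_states exist in states
--     - all transition sources and targets exist in states
--     - terminal states have no outgoing transitions
--     - all states reachable from initial_state
--     - all terminal states reachable
--
--     Args:
--         states: List of valid state names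
--         transitions: Dict mapping state -> list of reachable states
--         initial_state: Starting state for new encounters
--         terminal_states: States that end the encounter (no outgoing transitions)
--
--     Returns:
--         List of error message strings (empty if valid)
--     """
--     errors = []
--     states_set = set(states)
--
--     # Basic membership: initial_state in states
--     if initial_state not in states_set:
--         errors.append(f"initial_state '{initial_state}' not in states")
--
--     # Basic membership: terminal_states subset of states
--     for ts in terminal_states:
--         if ts not in states_set:
--             errors.append(f"terminal_state '{ts}' not in states")
--
--     # Transition sources and targets exist in states
--     for from_state, to_states in transitions.items():
--         if from_state not in states_set:
--             errors.append(f"transition from unknown state '{from_state}'")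
--         for to_state in to_states:
--             if to_state not in states_set:
--                 errors.append(f"transition to unknown state '{to_state}'")
--
--     # Terminal states have no outgoing transitions
--     for ts in terminal_states:
--         if ts in transitions and transitions[ts]:
--             errors.append(f"terminal state '{ts}' has outgoing transitions")
--
--     # Reachability: all states reachable from initial_state
--     if initial_state in states_set:  # Only check if initial_state is valid
--         reachable = _find_reachable_states(initial_state, transitions)
--         for state in states:
--             if state not in reachable:
--                 errors.append(f"state '{state}' unreachable from initial_state")
--
--     return errors
--
-- def _find_reachable_states(start: str, transitions: dict[str, list[str]]) -> set[str]:
--     """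
--     BFS to find all reachable states from start.
--
--     Args:
--         start: Starting state
--         transitions: Dict mapping state -> list of reachable states
--
--     Returns:
--         Set of all states reachable from start (including start itself)
--     """
--     visited = {start}
--     queue = [start]
--
--     while queue:
--         current = queue.pop(0)
--         for next_state in transitions.get(current, []):
--             if next_state not in visited:
--                 visited.add(next_state)
--                 queue.append(next_state)
--
--     return visited
-- ===== SOURCE B (Python) =====
-- def validate_definition_graph(
--     states: list[str],
--     transitions: dict[str, list[str]],
--     initial_state: str,
--     terminal_states: list[str]
-- ) -> list[str]:
--     """Same validation report, assembled as one concatenation of comprehension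
--     blocks; reachability by a bounded number of monotone whole-set expansion
--     passes (no BFS queue, no worklist)."""
--     known = set(states)
--     errors = (
--         ([] if initial_state in known else [f"initial_state '{initial_state}' not in states"])
--         + [f"terminal_state '{ts}' not in states" for ts in terminal_states if ts not in known]
--         + [msg for src, dsts in transitions.items()
--                for msg in ([] if src in known else [f"transition from unknown state '{src}'"])
--                           + [f"transition to unknown state '{dst}'" for dst in dsts if dst not in known]]
--         + [f"terminal state '{ts}' has outgoing transitions" for ts in terminal_states if transitions.get(ts)]
--     )
--     if initial_state in known:
--         reach = _closure(initial_state, transitions)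
--         errors += [f"state '{s}' unreachable from initial_state" for s in states if s not in reach]
--     return errors
--
--
-- def _closure(start: str, transitions: dict[str, list[str]]) -> set[str]:
--     """Bounded-pass closure: E+1 expansion passes (E = total number of edge
--     targets) reach a fixpoint, since any reachable state is at hop-distance
--     at most E from start; each pass unions in all one-step successors."""
--     reach = {start}
--     for _ in range(sum(len(v) for v in transitions.values()) + 1):
--         reach = reach | {t for s in reach for t in transitions.get(s, ())}
--     return reach
-- ===== Notes on version B (the rewrite author's own statement) =====
-- stated objective: alternative
-- what changed: Reachability is computed by a bounded number (E+1) of monotone whole-set expansion passes (reach |= successors-of-reach) instead of A's FIFO-queue BFS with a visited set, and the error report is assembled as one concatenation of filter/map comprehension blocks instead of a sequentially mutated accumulator list.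
import Mathlib
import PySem

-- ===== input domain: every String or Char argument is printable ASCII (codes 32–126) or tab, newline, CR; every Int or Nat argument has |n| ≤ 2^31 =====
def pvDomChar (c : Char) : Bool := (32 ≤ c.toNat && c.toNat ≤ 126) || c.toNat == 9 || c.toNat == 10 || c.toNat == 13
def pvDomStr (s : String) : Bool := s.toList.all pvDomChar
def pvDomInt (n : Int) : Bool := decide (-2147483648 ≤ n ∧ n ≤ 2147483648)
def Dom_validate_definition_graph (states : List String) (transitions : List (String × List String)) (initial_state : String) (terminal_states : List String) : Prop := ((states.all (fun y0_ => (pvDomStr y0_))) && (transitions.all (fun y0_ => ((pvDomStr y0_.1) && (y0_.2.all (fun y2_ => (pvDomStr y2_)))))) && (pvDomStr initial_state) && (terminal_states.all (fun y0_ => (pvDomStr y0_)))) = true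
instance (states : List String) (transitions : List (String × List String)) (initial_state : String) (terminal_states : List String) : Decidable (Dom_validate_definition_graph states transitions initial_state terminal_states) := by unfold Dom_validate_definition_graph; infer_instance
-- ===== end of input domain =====

-- ===== PORT A =====
-- B replaces A's FIFO-queue BFS by a bounded number of monotone whole-set expansion passes and
-- builds the error report as one concatenation of filter/map blocks instead of a mutated accumulator.

-- the f-string messages of A
def pvMsgInit (s : String) : String := "initial_state '" ++ s ++ "' not in states"
def pvMsgTerm (s : String) : String := "terminal_state '" ++ s ++ "' not in states"
def pvMsgFrom (s : String) : String := "transition from unknown state '" ++ s ++ "'"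
def pvMsgTo (s : String) : String := "transition to unknown state '" ++ s ++ "'"
def pvMsgOut (s : String) : String := "terminal state '" ++ s ++ "' has outgoing transitions"
def pvMsgUnreach (s : String) : String := "state '" ++ s ++ "' unreachable from initial_state"

-- transitions.get(s, []) on the dict built from the association list
def pvSuccs (transitions : List (String × List String)) (s : String) : List String :=
  (PySem.Dict.ofList transitions).getD s []

-- universe of possible new states: every target occurring in the dict (termination bound)
def pvU (transitions : List (String × List String)) : List String :=
  (PySem.Dict.ofList transitions).items.flatMap Prod.snd

lemma pv_succs_sub (transitions : List (String × List String)) (s t : String)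
    (h : t ∈ pvSuccs transitions s) : t ∈ pvU transitions := by
  unfold pvSuccs at h
  rcases hg : (PySem.Dict.ofList transitions).get? s with _ | l
  · rw [PySem.Dict.getD_eq_get?_getD, hg] at h; simp at h
  · rw [PySem.Dict.getD_eq_get?_getD, hg] at h
    simp only [Option.getD_some] at h
    exact List.mem_flatMap.2 ⟨(s, l), PySem.Dict.mem_items_of_get?_eq_some _ hg, h⟩

-- one strict decrease of the "unvisited" measure
lemma pv_filter_lt (U v : List String) (t : String) (hU : t ∈ U) (hv : t ∉ v) :
    (U.filter (fun x => decide (x ∉ v ++ [t]))).length < (U.filter (fun x => decide (x ∉ v))).length := by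
  have hrw : U.filter (fun x => decide (x ∉ v ++ [t]))
      = (U.filter (fun x => decide (x ∉ v))).filter (fun x => decide (x ≠ t)) := by
    rw [List.filter_filter]
    apply List.filter_congr
    intro x _
    simp [List.mem_append, Bool.and_comm]
  rw [hrw]
  refine List.length_filter_lt_length_iff_exists.2 ⟨t, ?_, by simp⟩
  exact List.mem_filter.2 ⟨hU, by simpa using hv⟩

lemma pv_filter_sub (U : List String) : ∀ (news v : List String), news.Nodup →
    (∀ x ∈ news, x ∈ U ∧ x ∉ v) →
    (U.filter (fun x => decide (x ∉ v ++ news))).length + news.length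
      ≤ (U.filter (fun x => decide (x ∉ v))).length := by
  intro news
  induction news with
  | nil => intro v _ _; simp
  | cons t tl ih =>
    intro v hnd hmem
    have ht := hmem t (by simp)
    have h1 : (U.filter (fun x => decide (x ∉ (v ++ [t]) ++ tl))).length + tl.length
        ≤ (U.filter (fun x => decide (x ∉ v ++ [t]))).length := by
      refine ih (v ++ [t]) hnd.of_cons ?_
      intro x hx
      refine ⟨(hmem x (by simp [hx])).1, ?_⟩
      have hxt : x ≠ t := fun he => (List.nodup_cons.1 hnd).1 (he ▸ hx)
      simp [List.mem_append, (hmem x (by simp [hx])).2, hxt]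
    have h2 := pv_filter_lt U v t ht.1 ht.2
    have h3 : U.filter (fun x => decide (x ∉ v ++ t :: tl))
        = U.filter (fun x => decide (x ∉ (v ++ [t]) ++ tl)) := by
      apply List.filter_congr; intro x _; simp [List.mem_append]
    rw [h3]; simp only [List.length_cons]; omega

-- the inner for-loop of the BFS step: add each unvisited successor to visited and queue
def pvBFSfold (visited queue : List String) (ts : List String) : List String × List String :=
  ts.foldl (fun p t => if t ∈ p.1 then p else (p.1 ++ [t], p.2 ++ [t])) (visited, queue)

lemma pv_bfsfold_spec : ∀ (ts v q : List String), ∃ news,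
    pvBFSfold v q ts = (v ++ news, q ++ news) ∧ news.Nodup ∧
    (∀ x ∈ news, x ∈ ts ∧ x ∉ v) ∧ (∀ t ∈ ts, t ∈ v ++ news) := by
  intro ts
  induction ts with
  | nil => intro v q; exact ⟨[], by simp [pvBFSfold], by simp, by simp, by simp⟩
  | cons t tl ih =>
    intro v q
    by_cases h : t ∈ v
    · obtain ⟨news, h1, h2, h3, h4⟩ := ih v q
      refine ⟨news, ?_, h2, fun x hx => ⟨by simp [(h3 x hx).1], (h3 x hx).2⟩, ?_⟩
      · simpa [pvBFSfold, h] using h1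
      · intro u hu
        rcases List.mem_cons.1 hu with rfl | hu
        · exact List.mem_append.2 (Or.inl h)
        · exact h4 u hu
    · obtain ⟨news, h1, h2, h3, h4⟩ := ih (v ++ [t]) (q ++ [t])
      refine ⟨t :: news, ?_, ?_, ?_, ?_⟩
      · have : pvBFSfold v q (t :: tl) = pvBFSfold (v ++ [t]) (q ++ [t]) tl := by
          simp [pvBFSfold, h]
        rw [this, h1]; simp
      · exact List.nodup_cons.2 ⟨fun hm => by simpa using (h3 t hm).2, h2⟩
      · intro x hx
        rcases List.mem_cons.1 hx with rfl | hx
        · exact ⟨by simp, h⟩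
        · have := h3 x hx
          exact ⟨by simp [this.1], fun hq => this.2 (by simp [hq])⟩
      · intro u hu
        rcases List.mem_cons.1 hu with rfl | hu
        · simp
        · have := h4 u hu
          simpa [List.mem_append, List.append_assoc] using this

lemma pv_bfs_dec (transitions : List (String × List String)) (v rest : List String) (current : String) :
    ((pvU transitions).filter (fun x => decide (x ∉ (pvBFSfold v rest (pvSuccs transitions current)).1))).length
      + (pvBFSfold v rest (pvSuccs transitions current)).2.length
    < (((pvU transitions).filter (fun x => decide (x ∉ v))).length + rest.length) + 1 := by
  obtain ⟨news, h1, h2, h3, h4⟩ := pv_bfsfold_spec (pvSuccs transitions current) v rest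
  have hsub := pv_filter_sub (pvU transitions) news v h2
    (fun x hx => ⟨pv_succs_sub _ _ _ (h3 x hx).1, (h3 x hx).2⟩)
  rw [h1]
  simp only [List.length_append]
  omega

-- port of _find_reachable_states's while-loop (queue.pop(0); enqueue unvisited successors)
def pvBFSvisit (transitions : List (String × List String)) (visited : PySem.Set String)
    (queue : List String) : PySem.Set String :=
  match queue with
  | [] => visited
  | current :: rest =>
      let p := pvBFSfold visited rest (pvSuccs transitions current)
      pvBFSvisit transitions p.1 p.2
termination_by ((pvU transitions).filter (fun x => decide (x ∉ visited))).length + queue.length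
decreasing_by
  have h := pv_bfs_dec transitions visited rest current
  simp only [List.length_cons]
  omega

-- port of _find_reachable_states
def pvFindReachableStates (start : String) (transitions : List (String × List String)) : PySem.Set String :=
  pvBFSvisit transitions (PySem.Set.ofList [start]) [start]

-- port of A
def validate_definition_graph (states : List String) (transitions : List (String × List String))
    (initial_state : String) (terminal_states : List String) : List String :=
  let errors : List String := []
  let states_set : PySem.Set String := PySem.Set.ofList states
  let d := PySem.Dict.ofList transitions
  let errors := if !(PySem.Set.contains states_set initial_state) then errors ++ [pvMsgInit initial_state] else errors
  let errors := terminal_states.foldl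
    (fun errors ts => if !(PySem.Set.contains states_set ts) then errors ++ [pvMsgTerm ts] else errors) errors
  let errors := d.items.foldl
    (fun errors p =>
      let errors := if !(PySem.Set.contains states_set p.1) then errors ++ [pvMsgFrom p.1] else errors
      p.2.foldl (fun errors t => if !(PySem.Set.contains states_set t) then errors ++ [pvMsgTo t] else errors) errors)
    errors
  let errors := terminal_states.foldl
    (fun errors ts => if d.contains ts && !(d.getD ts []).isEmpty then errors ++ [pvMsgOut ts] else errors) errors
  if PySem.Set.contains states_set initial_state then
    let reachable := pvFindReachableStates initial_state transitions
    states.foldl (fun errors state => if !(PySem.Set.contains reachable state) then errors ++ [pvMsgUnreach state] else errors) errors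
  else errors

-- ===== PORT B =====
-- transitions.get(s, ()) in B's closure, written on the Option level
def pvSuccsB (transitions : List (String × List String)) (s : String) : List String :=
  match (PySem.Dict.ofList transitions).get? s with
  | some l => l
  | none => []

-- one expansion pass: reach | {t for s in reach for t in transitions.get(s, ())}
def pvStepB (transitions : List (String × List String)) (reach : PySem.Set String) : PySem.Set String :=
  PySem.Set.union reach (PySem.Set.ofList (reach.flatMap (fun s => pvSuccsB transitions s)))

-- B's _closure: E+1 expansion passes from {start}, E = total number of edge targets
def pvClosureB (start : String) (transitions : List (String × List String)) : PySem.Set String :=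
  let bound := ((PySem.Dict.ofList transitions).values.map List.length).sum
  (List.range (bound + 1)).foldl (fun reach _ => pvStepB transitions reach) (PySem.Set.ofList [start])

-- port of B
def validate_definition_graph_alt (states : List String) (transitions : List (String × List String))
    (initial_state : String) (terminal_states : List String) : List String :=
  let known : PySem.Set String := PySem.Set.ofList states
  let d := PySem.Dict.ofList transitions
  (if PySem.Set.contains known initial_state then [] else ["initial_state '" ++ initial_state ++ "' not in states"])
  ++ (terminal_states.filter (fun ts => !(PySem.Set.contains known ts))).map
       (fun ts => "terminal_state '" ++ ts ++ "' not in states")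
  ++ d.items.flatMap (fun p =>
        (if PySem.Set.contains known p.1 then [] else ["transition from unknown state '" ++ p.1 ++ "'"])
        ++ (p.2.filter (fun t => !(PySem.Set.contains known t))).map
             (fun t => "transition to unknown state '" ++ t ++ "'"))
  ++ (terminal_states.filter (fun ts => (d.get? ts).elim false (fun l => !l.isEmpty))).map
       (fun ts => "terminal state '" ++ ts ++ "' has outgoing transitions")
  ++ (if PySem.Set.contains known initial_state then
        (states.filter (fun s => !((pvClosureB initial_state transitions).contains s))).map
          (fun s => "state '" ++ s ++ "' unreachable from initial_state")
      else [])

-- ===== PRECONDITION & SPEC =====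
def Spec_validate_definition_graph (states : List String) (transitions : List (String × List String)) (initial_state : String) (terminal_states : List String) (out : List String) : Prop := out = validate_definition_graph_alt states transitions initial_state terminal_states
instance (states : List String) (transitions : List (String × List String)) (initial_state : String) (terminal_states : List String) (out : List String) : Decidable (Spec_validate_definition_graph states transitions initial_state terminal_states out) := by unfold Spec_validate_definition_graph; infer_instance

-- ===== CLAIM (what is proved, stated in full; the proofs are below) =====
def Claim_equal_validate_definition_graph : Prop := ∀ (states : List String) (transitions : List (String × List String)) (initial_state : String) (terminal_states : List String), Dom_validate_definition_graph states transitions initial_state terminal_states → Spec_validate_definition_graph states transitions initial_state terminal_states (validate_definition_graph states transitions initial_state terminal_states)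

-- ===== LEMMAS AND PROOFS =====

lemma pv_succsB_eq (transitions : List (String × List String)) (s : String) :
    pvSuccsB transitions s = pvSuccs transitions s := by
  unfold pvSuccsB pvSuccs
  rw [PySem.Dict.getD_eq_get?_getD]
  rcases (PySem.Dict.ofList transitions).get? s with _ | l <;> rfl

-- BFS-side lemmas (A)

lemma pv_bfs_mono (transitions : List (String × List String)) :
    ∀ (v q : List String), ∀ x ∈ v, x ∈ pvBFSvisit transitions v q := by
  intro v q
  fun_induction pvBFSvisit with
  | case1 v => exact fun x hx => hx
  | case2 v current rest p ih =>
    intro x hx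
    apply ih
    obtain ⟨news, h1, -, -, -⟩ := pv_bfsfold_spec (pvSuccs transitions current) v rest
    have hp : p.1 = v ++ news := by rw [show p = pvBFSfold v rest (pvSuccs transitions current) from rfl, h1]
    rw [hp]
    exact List.mem_append.2 (Or.inl hx)

lemma pv_bfs_sound (transitions : List (String × List String)) (P : String → Prop)
    (hP : ∀ a b, P a → b ∈ pvSuccs transitions a → P b) :
    ∀ (v q : List String), (∀ y ∈ v, P y) → (∀ y ∈ q, P y) →
    ∀ x ∈ pvBFSvisit transitions v q, P x := by
  intro v q
  fun_induction pvBFSvisit with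
  | case1 v => exact fun hv _ x hx => hv x hx
  | case2 v current rest p ih =>
    intro hv hq x hx
    obtain ⟨news, h1, -, h3, -⟩ := pv_bfsfold_spec (pvSuccs transitions current) v rest
    have hp : p = (v ++ news, rest ++ news) := by
      rw [show p = pvBFSfold v rest (pvSuccs transitions current) from rfl, h1]
    have hnews : ∀ y ∈ news, P y := fun y hy =>
      hP current y (hq current (by simp)) (h3 y hy).1
    refine ih ?_ ?_ x hx
    · intro y hy
      rw [hp] at hy
      rcases List.mem_append.1 hy with h | h
      · exact hv y h
      · exact hnews y h
    · intro y hy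
      rw [hp] at hy
      rcases List.mem_append.1 hy with h | h
      · exact hq y (by simp [h])
      · exact hnews y h

lemma pv_bfs_closed (transitions : List (String × List String)) :
    ∀ (v q : List String), (∀ y ∈ q, y ∈ v) →
    (∀ s ∈ v, s ∉ q → ∀ t ∈ pvSuccs transitions s, t ∈ v) →
    ∀ s ∈ pvBFSvisit transitions v q, ∀ t ∈ pvSuccs transitions s, t ∈ pvBFSvisit transitions v q := by
  intro v q
  fun_induction pvBFSvisit with
  | case1 v => exact fun _ hinv s hs t ht => hinv s hs (by simp) t ht
  | case2 v current rest p ih =>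
    intro hq hinv
    obtain ⟨news, h1, -, h3, h4⟩ := pv_bfsfold_spec (pvSuccs transitions current) v rest
    have hp : p = (v ++ news, rest ++ news) := by
      rw [show p = pvBFSfold v rest (pvSuccs transitions current) from rfl, h1]
    refine ih ?_ ?_
    · intro y hy
      rw [hp] at hy ⊢
      rcases List.mem_append.1 hy with h | h
      · exact List.mem_append.2 (Or.inl (hq y (by simp [h])))
      · exact List.mem_append.2 (Or.inr h)
    · intro s hs hnq t ht
      rw [hp] at hs hnq ⊢
      rcases List.mem_append.1 hs with hsv | hsn
      · by_cases hsc : s = current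
        · subst hsc
          exact h4 t ht
        · have hsrest : s ∉ rest := fun h => hnq (List.mem_append.2 (Or.inl h))
          have : s ∉ current :: rest := by
            intro h
            rcases List.mem_cons.1 h with h | h
            · exact hsc h
            · exact hsrest h
          exact List.mem_append.2 (Or.inl (hinv s hsv this t ht))
      · exact absurd (List.mem_append.2 (Or.inr hsn)) hnq

-- closure-side lemmas (B)

lemma pv_stepB_mem (transitions : List (String × List String)) (S : List String) (x : String) :
    x ∈ pvStepB transitions S ↔ x ∈ S ∨ ∃ s ∈ S, x ∈ pvSuccsB transitions s := by
  unfold pvStepB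
  rw [PySem.Set.mem_union, PySem.Set.mem_ofList, List.mem_flatMap]

lemma pv_stepB_nodup (transitions : List (String × List String)) (S : List String)
    (h : S.Nodup) : (pvStepB transitions S).Nodup :=
  PySem.Set.nodup_union _ _ h

def pvClosedB (transitions : List (String × List String)) (S : List String) : Prop :=
  ∀ s ∈ S, ∀ x ∈ pvSuccsB transitions s, x ∈ S

lemma pv_closed_stepB_mem (transitions : List (String × List String)) (S : List String)
    (h : pvClosedB transitions S) (x : String) : x ∈ pvStepB transitions S ↔ x ∈ S := by
  rw [pv_stepB_mem]
  constructor
  · rintro (hx | ⟨s, hs, hx⟩)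
    · exact hx
    · exact h s hs x hx
  · exact Or.inl

lemma pv_closed_stepB (transitions : List (String × List String)) (S : List String)
    (h : pvClosedB transitions S) : pvClosedB transitions (pvStepB transitions S) := by
  intro s hs x hx
  rw [pv_closed_stepB_mem transitions S h] at hs ⊢
  exact h s hs x hx

lemma pv_grow (transitions : List (String × List String)) (S : List String)
    (hnc : ¬ pvClosedB transitions S) (hnd : S.Nodup) :
    S.length + 1 ≤ (pvStepB transitions S).length := by
  unfold pvClosedB at hnc
  push Not at hnc
  obtain ⟨s, hs, x, hx, hxS⟩ := hnc
  have hsub : (x :: S) ⊆ pvStepB transitions S := by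
    intro y hy
    rcases List.mem_cons.1 hy with rfl | hy
    · exact (pv_stepB_mem transitions S y).2 (Or.inr ⟨s, hs, hx⟩)
    · exact (pv_stepB_mem transitions S y).2 (Or.inl hy)
  have hnd' : (x :: S).Nodup := List.nodup_cons.2 ⟨hxS, hnd⟩
  have := (hnd'.subperm hsub).length_le
  simpa using this

-- a fold that ignores its elements is an iterate
lemma pv_foldl_const {α β : Type} (f : α → α) : ∀ (l : List β) (init : α),
    l.foldl (fun r _ => f r) init = f^[l.length] init := by
  intro l
  induction l with
  | nil => intro init; rfl
  | cons b tl ih =>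
    intro init
    simp only [List.foldl_cons, List.length_cons, ih, Function.iterate_succ_apply]

-- invariants of the iterated expansion from [start]
lemma pv_it_inv (transitions : List (String × List String)) (start : String) : ∀ (n : Nat),
    ((pvStepB transitions)^[n] [start]).Nodup ∧
    start ∈ (pvStepB transitions)^[n] [start] ∧
    (∀ x ∈ (pvStepB transitions)^[n] [start], x = start ∨ x ∈ pvU transitions) := by
  intro n
  induction n with
  | zero => exact ⟨by simp, by simp, by simp⟩
  | succ n ih =>
    obtain ⟨hnd, hst, hsub⟩ := ih
    rw [Function.iterate_succ_apply']
    refine ⟨pv_stepB_nodup _ _ hnd, (pv_stepB_mem _ _ _).2 (Or.inl hst), ?_⟩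
    intro x hx
    rcases (pv_stepB_mem _ _ _).1 hx with h | ⟨s, _, hxs⟩
    · exact hsub x h
    · right
      rw [pv_succsB_eq] at hxs
      exact pv_succs_sub transitions s x hxs

lemma pv_it_sound (transitions : List (String × List String)) (start : String)
    (P : String → Prop) (hstart : P start)
    (hP : ∀ a b, P a → b ∈ pvSuccsB transitions a → P b) : ∀ (n : Nat),
    ∀ x ∈ (pvStepB transitions)^[n] [start], P x := by
  intro n
  induction n with
  | zero => intro x hx; rw [List.mem_singleton.1 hx]; exact hstart
  | succ n ih =>
    intro x hx
    rw [Function.iterate_succ_apply'] at hx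
    rcases (pv_stepB_mem _ _ _).1 hx with h | ⟨s, hs, hxs⟩
    · exact ih x h
    · exact hP s x (ih s hs) hxs

lemma pv_it_pigeon (transitions : List (String × List String)) (start : String) : ∀ (n : Nat),
    pvClosedB transitions ((pvStepB transitions)^[n] [start]) ∨
    n + 1 ≤ ((pvStepB transitions)^[n] [start]).length := by
  intro n
  induction n with
  | zero => right; simp
  | succ n ih =>
    by_cases hc : pvClosedB transitions ((pvStepB transitions)^[n] [start])
    · left
      rw [Function.iterate_succ_apply']
      exact pv_closed_stepB _ _ hc
    · rcases ih with h | h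
      · exact absurd h hc
      · right
        rw [Function.iterate_succ_apply']
        have := pv_grow transitions _ hc (pv_it_inv transitions start n).1
        omega

lemma pv_bound_eq (transitions : List (String × List String)) :
    ((PySem.Dict.ofList transitions).values.map List.length).sum = (pvU transitions).length := by
  unfold pvU
  rw [PySem.Dict.values, List.length_flatMap, List.map_map]
  rfl

lemma pv_closureB_closed (transitions : List (String × List String)) (start : String) :
    pvClosedB transitions (pvClosureB start transitions) := by
  unfold pvClosureB
  rw [pv_foldl_const, List.length_range, pv_bound_eq]
  have hof : PySem.Set.ofList [start] = [start] := rfl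
  rw [hof]
  rcases pv_it_pigeon transitions start ((pvU transitions).length + 1) with h | h
  · exact h
  · exfalso
    obtain ⟨hnd, -, hsub⟩ := pv_it_inv transitions start ((pvU transitions).length + 1)
    have hsub' : (pvStepB transitions)^[(pvU transitions).length + 1] [start] ⊆ start :: pvU transitions := by
      intro x hx
      rcases hsub x hx with rfl | hx
      · exact List.mem_cons_self
      · exact List.mem_cons_of_mem _ hx
    have := (hnd.subperm hsub').length_le
    simp only [List.length_cons] at this
    omega

lemma pv_closureB_start (transitions : List (String × List String)) (start : String) :
    start ∈ pvClosureB start transitions := by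
  unfold pvClosureB
  rw [pv_foldl_const]
  exact ((pv_it_inv transitions start _).2).1

lemma pv_closureB_sound (transitions : List (String × List String)) (start : String)
    (P : String → Prop) (hstart : P start)
    (hP : ∀ a b, P a → b ∈ pvSuccsB transitions a → P b) :
    ∀ x ∈ pvClosureB start transitions, P x := by
  unfold pvClosureB
  rw [pv_foldl_const]
  exact pv_it_sound transitions start P hstart hP _

lemma pv_reach_iff (transitions : List (String × List String)) (init : String) :
    ∀ x, x ∈ pvBFSvisit transitions (PySem.Set.ofList [init]) [init]
      ↔ x ∈ pvClosureB init transitions := by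
  have hof : PySem.Set.ofList [init] = [init] := rfl
  rw [hof]
  intro x
  constructor
  · intro hx
    refine pv_bfs_sound transitions (fun y => y ∈ pvClosureB init transitions)
      (fun a b ha hb => ?_) [init] [init] ?_ ?_ x hx
    · refine pv_closureB_closed transitions init a ha b ?_
      rw [pv_succsB_eq]; exact hb
    · intro y hy; rw [List.mem_singleton.1 hy]; exact pv_closureB_start transitions init
    · intro y hy; rw [List.mem_singleton.1 hy]; exact pv_closureB_start transitions init
  · intro hx
    refine pv_closureB_sound transitions init (fun y => y ∈ pvBFSvisit transitions [init] [init])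
      ?_ (fun a b ha hb => ?_) x hx
    · exact pv_bfs_mono transitions [init] [init] init (by simp)
    · refine pv_bfs_closed transitions [init] [init] (fun y hy => hy)
        (fun s hs hnq => absurd hs hnq) a ha b ?_
      rw [← pv_succsB_eq]; exact hb

lemma pv_out_cond (d : PySem.Dict String (List String)) (ts : String) :
    (d.contains ts && !(d.getD ts []).isEmpty) = (d.get? ts).elim false (fun l => !l.isEmpty) := by
  rw [PySem.Dict.getD_eq_get?_getD, PySem.Dict.contains_eq_isSome_get?]
  rcases d.get? ts with _ | l <;> simp

lemma pv_main (states : List String) (transitions : List (String × List String))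
    (initial_state : String) (terminal_states : List String) :
    validate_definition_graph states transitions initial_state terminal_states
      = validate_definition_graph_alt states transitions initial_state terminal_states := by
  simp only [validate_definition_graph, validate_definition_graph_alt, pvFindReachableStates,
    pvMsgInit, pvMsgTerm, pvMsgFrom, pvMsgTo, pvMsgOut, pvMsgUnreach]
  rw [PySem.List.foldl_congr_mem ((PySem.Dict.ofList transitions).items) _
    (fun errors p => errors ++ ((if PySem.Set.contains (PySem.Set.ofList states) p.1 then []
        else ["transition from unknown state '" ++ p.1 ++ "'"])
      ++ (p.2.filter (fun t => !(PySem.Set.contains (PySem.Set.ofList states) t))).map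
          (fun t => "transition to unknown state '" ++ t ++ "'")) ) _ ?_]
  · rw [PySem.List.foldl_append_eq_flatMap]
    rw [PySem.List.foldl_append_if, PySem.List.foldl_append_if, PySem.List.foldl_append_if]
    have hout : (fun ts => (PySem.Dict.ofList transitions).contains ts
        && !((PySem.Dict.ofList transitions).getD ts []).isEmpty)
        = (fun ts => ((PySem.Dict.ofList transitions).get? ts).elim false (fun l => !l.isEmpty)) :=
      funext (pv_out_cond (PySem.Dict.ofList transitions))
    rw [hout]
    by_cases hm : initial_state ∈ states
    · simp only [PySem.Set.contains, List.contains_eq_mem, PySem.Set.mem_ofList, hm,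
        decide_true, Bool.not_true, Bool.false_eq_true, if_false, if_true]
      have hfil : states.filter
          (fun s => !decide (s ∈ pvBFSvisit transitions (PySem.Set.ofList [initial_state]) [initial_state]))
          = states.filter (fun s => !decide (s ∈ pvClosureB initial_state transitions)) := by
        apply List.filter_congr
        intro x _
        have hiff := pv_reach_iff transitions initial_state x
        by_cases h : x ∈ pvClosureB initial_state transitions
        · simp [h, hiff.2 h]
        · have h2 : x ∉ pvBFSvisit transitions (PySem.Set.ofList [initial_state]) [initial_state] :=
            fun hc => h (hiff.1 hc)
          simp [h, h2]
      rw [hfil]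
    · simp only [PySem.Set.contains, List.contains_eq_mem, PySem.Set.mem_ofList, hm,
        decide_false, Bool.not_false, if_true]
      simp [List.append_assoc]
  · intro acc p _
    rw [PySem.List.foldl_append_if]
    by_cases hc : p.1 ∈ states <;>
      simp [PySem.Set.contains, PySem.Set.mem_ofList, hc, List.append_assoc]

-- ===== VERDICT (by name: the statement is the Claim_ definition above) =====
theorem validate_definition_graph_spec : Claim_equal_validate_definition_graph := by
  intro states transitions initial_state terminal_states _
  unfold Spec_validate_definition_graph
  exact pv_main states transitions initial_state terminal_states
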